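-- pv_equiv track=rewrite | github.com/Dashuto22/DSA | Arrays_and_Hashing/minimum_num_swaps_to_make_string_balanced.py | min_swaps_make_string_balanced
-- ===== SOURCE A (Python) =====
-- def min_swaps_make_string_balanced(s):
--     extraclose, res = 0, 0
--
--     for c in s:
--         if c==']':
--             extraclose += 1
--
--         else:
--             extraclose -= 1
--
--         res = max(res, extraclose)
--
--     return (res+1)//2
-- ===== SOURCE B (Python) =====
-- def min_swaps_make_string_balanced(s):
--     stack = []
--     for c in s:
--         if c == ']' and stack and stack[-1] != ']':
--             stack.pop()
--         else:
--             stack.append(c)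
--     return (stack.count(']') + 1) // 2
-- ===== Notes on version B (the rewrite author's own statement) =====
-- stated objective: alternative
-- what changed: Replaces the running extra-close counter whose peak is tracked with max by an explicit stack of unmatched symbols (pop a matched pair, push otherwise) and a final count of leftover closing brackets.
import Mathlib
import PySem

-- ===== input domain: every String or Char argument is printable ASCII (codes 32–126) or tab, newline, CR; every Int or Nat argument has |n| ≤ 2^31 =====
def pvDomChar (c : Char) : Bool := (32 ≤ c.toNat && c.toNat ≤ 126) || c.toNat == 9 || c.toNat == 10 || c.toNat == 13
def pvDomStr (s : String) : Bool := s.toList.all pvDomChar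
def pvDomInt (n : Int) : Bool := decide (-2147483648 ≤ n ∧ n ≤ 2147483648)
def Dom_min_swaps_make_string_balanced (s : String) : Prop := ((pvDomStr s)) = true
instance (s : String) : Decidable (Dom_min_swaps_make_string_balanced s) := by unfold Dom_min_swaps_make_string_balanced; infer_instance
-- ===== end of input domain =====

-- B replaces A's running peak-imbalance counter with an explicit stack of unmatched
-- symbols and a final count of leftover closing brackets (alternative decomposition).

-- ===== PORT A =====
-- state = (extraclose, res); literal transliteration of A's loop
def pvStepA (p : Int × Int) (c : Char) : Int × Int :=
  let e := if c = ']' then p.1 + 1 else p.1 - 1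
  (e, max p.2 e)

def min_swaps_make_string_balanced (s : String) : Int :=
  let p := s.toList.foldl pvStepA (0, 0)
  PySem.Int.floordiv (p.2 + 1) 2

-- ===== PORT B =====
-- stack with head = top; push = cons, pop = tail (transliteration of Source B's loop body)
def pvStepB (st : List Char) (c : Char) : List Char :=
  if c = ']' ∧ st ≠ [] ∧ st.head? ≠ some ']' then st.tail else c :: st

def min_swaps_make_string_balanced_alt (s : String) : Int :=
  let stack := s.toList.foldl pvStepB []
  PySem.Int.floordiv ((PySem.List.count stack ']' : Int) + 1) 2

-- ===== PRECONDITION & SPEC =====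
def Spec_min_swaps_make_string_balanced (s : String) (out : Int) : Prop := out = min_swaps_make_string_balanced_alt s
instance (s : String) (out : Int) : Decidable (Spec_min_swaps_make_string_balanced s out) := by unfold Spec_min_swaps_make_string_balanced; infer_instance

-- ===== CLAIM (what is proved, stated in full; the proofs are below) =====
def Claim_equal_min_swaps_make_string_balanced : Prop := ∀ (s : String), Dom_min_swaps_make_string_balanced s → Spec_min_swaps_make_string_balanced s (min_swaps_make_string_balanced s)

-- ===== LEMMAS AND PROOFS =====

-- Invariant: B's stack is (opens ++ closes); A's extraclose = |closes| - |opens|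
-- and A's res = |closes|.
theorem pv_inv (cs : List Char) : ∀ (op cl : List Char),
    (∀ x ∈ op, x ≠ ']') → (∀ x ∈ cl, x = ']') →
    ∃ op' cl', cs.foldl pvStepB (op ++ cl) = op' ++ cl' ∧
      (∀ x ∈ op', x ≠ ']') ∧ (∀ x ∈ cl', x = ']') ∧
      cs.foldl pvStepA ((cl.length : Int) - op.length, (cl.length : Int)) =
        ((cl'.length : Int) - op'.length, (cl'.length : Int)) := by
  induction cs with
  | nil => intro op cl hop hcl; exact ⟨op, cl, rfl, hop, hcl, rfl⟩
  | cons c cs ih =>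
    intro op cl hop hcl
    rw [List.foldl_cons, List.foldl_cons]
    by_cases hc : c = ']'
    · subst hc
      cases op with
      | cons o ops =>
        have hstep : pvStepB ((o :: ops) ++ cl) ']' = ops ++ cl := by
          simp [pvStepB]
          intro h; exact absurd h (hop o (by simp))
        have hA : pvStepA ((cl.length : Int) - ((o :: ops).length : Int), (cl.length : Int)) ']'
            = ((cl.length : Int) - (ops.length : Int), (cl.length : Int)) := by
          simp only [pvStepA, reduceIte, Prod.ext_iff, List.length_cons]
          push_cast
          constructor <;> omega
        rw [hstep, hA]
        exact ih ops cl (fun x hx => hop x (by simp [hx])) hcl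
      | nil =>
        have hstep : pvStepB (([] : List Char) ++ cl) ']' = ']' :: cl := by
          cases cl with
          | nil => simp [pvStepB]
          | cons d ds =>
            have : d = ']' := hcl d (by simp)
            subst this
            simp [pvStepB]
        have hA : pvStepA ((cl.length : Int) - (([] : List Char).length : Int), (cl.length : Int)) ']'
            = (((']' :: cl).length : Int) - (([] : List Char).length : Int), ((']' :: cl).length : Int)) := by
          simp only [pvStepA, reduceIte, Prod.ext_iff, List.length_cons, List.length_nil]
          push_cast
          constructor <;> omega
        rw [hstep, hA]
        have hcl' : ∀ x ∈ ']' :: cl, x = ']' := by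
          intro x hx
          rcases List.mem_cons.mp hx with h | h
          · exact h
          · exact hcl x h
        have := ih [] (']' :: cl) (by simp) hcl'
        rwa [List.nil_append] at this
    · have hstep : pvStepB (op ++ cl) c = (c :: op) ++ cl := by
        simp [pvStepB, hc]
      have hA : pvStepA ((cl.length : Int) - (op.length : Int), (cl.length : Int)) c
          = ((cl.length : Int) - (((c :: op).length : Int)), (cl.length : Int)) := by
        simp only [pvStepA, if_neg hc, Prod.ext_iff, List.length_cons]
        push_cast
        constructor <;> omega
      rw [hstep, hA]
      exact ih (c :: op) cl (fun x hx => by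
        rcases List.mem_cons.mp hx with h | h
        · exact h ▸ hc
        · exact hop x h) hcl

-- ===== VERDICT (by name: the statement is the Claim_ definition above) =====
theorem min_swaps_make_string_balanced_spec : Claim_equal_min_swaps_make_string_balanced := by
  intro s _
  unfold Spec_min_swaps_make_string_balanced
  unfold min_swaps_make_string_balanced min_swaps_make_string_balanced_alt
  obtain ⟨op', cl', hB, hop', hcl', hA⟩ := pv_inv s.toList [] [] (by simp) (by simp)
  simp only [List.length_nil, Nat.cast_zero, sub_zero] at hA
  simp only [List.append_nil] at hB
  rw [hB, hA]
  have h1 : PySem.List.count (op' ++ cl') ']' = cl'.length := by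
    rw [PySem.List.count_eq]
    rw [List.count_append]
    have h2 : op'.count ']' = 0 := by
      rw [List.count_eq_zero]
      intro h; exact hop' ']' h rfl
    have h3 : cl'.count ']' = cl'.length := by
      rw [List.count_eq_length]
      intro x hx; exact ((hcl' x hx) ▸ rfl)
    omega
  simp only [h1]
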